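-- pv_equiv track=rewrite | github.com/rdailey274455/WoodyPyzzle | woody.py | board_draw
-- ===== SOURCE A (Python) =====
-- def board_draw(board_lol,show_axes):
--     board_string=str()
--     for r in range(-1 if show_axes else 0,len(board_lol)):
--         for c in range(-1 if show_axes else 0,len(board_lol[r])):
--             if r==-1 and c==-1:
--                 board_string+='  '
--             elif r==-1 and not c==-1:
--                 board_string+=str(c+1)+' ' if c+1<10 else str(c+1)  # board_string+=' '+chr(ord('A')+c)
--             elif not r==-1 and c==-1:
--                 board_string+=' '+str(r+1) if r+1<10 else str(r+1)
--             else: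
--                 board_string+=board_lol[r][c]
--         board_string+='\n'
--     return board_string
-- ===== SOURCE B (Python) =====
-- def board_draw(board_lol, show_axes):
--     # Materialize the full token grid first (axis labels become ordinary cells),
--     # then render any grid uniformly by joining cells and lines.
--     if show_axes:
--         header = ['  '] + [str(c + 1) + ' ' if c < 9 else str(c + 1)
--                            for c in range(len(board_lol[-1]))]
--         grid = [header] + [[' ' + str(r + 1) if r < 9 else str(r + 1)] + list(row)
--                            for r, row in enumerate(board_lol)]
--     else:
--         grid = [list(row) for row in board_lol]
--     return ''.join(''.join(cells) + '\n' for cells in grid)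
-- ===== Notes on version B (the rewrite author's own statement) =====
-- stated objective: alternative
-- what changed: A renders in one sentinel-indexed nested loop (range(-1,...) with a four-way branch per cell, += per token); B first materializes a complete token grid in which axis labels are ordinary cells (comprehensions/enumerate), then renders any grid with a uniform double str.join and no per-cell branching.
import Mathlib
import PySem

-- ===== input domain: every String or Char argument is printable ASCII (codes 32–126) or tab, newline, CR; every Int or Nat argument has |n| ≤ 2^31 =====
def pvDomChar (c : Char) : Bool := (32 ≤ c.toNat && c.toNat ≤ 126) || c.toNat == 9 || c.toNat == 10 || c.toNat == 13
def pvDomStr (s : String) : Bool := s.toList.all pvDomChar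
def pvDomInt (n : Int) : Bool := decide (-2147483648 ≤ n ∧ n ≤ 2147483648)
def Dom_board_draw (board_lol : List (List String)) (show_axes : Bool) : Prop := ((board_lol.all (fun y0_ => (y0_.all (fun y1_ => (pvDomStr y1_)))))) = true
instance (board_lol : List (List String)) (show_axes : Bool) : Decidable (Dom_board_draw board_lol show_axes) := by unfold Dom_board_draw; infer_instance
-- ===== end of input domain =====

-- B materializes the token grid (axis labels as ordinary cells) and renders it with
-- a uniform double join, instead of A's sentinel-indexed nested loop (objective: alternative).

-- ===== PORT A =====
def board_draw (board_lol : List (List String)) (show_axes : Bool) : String :=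
  (PySem.List.pyRange (if show_axes then -1 else 0) board_lol.length 1).foldl
    (fun board_string r =>
      let row := PySem.List.pyGetD board_lol r []   -- board_lol[r]; in range under Pre_
      ((PySem.List.pyRange (if show_axes then -1 else 0) row.length 1).foldl
        (fun board_string c =>
          if r = -1 ∧ c = -1 then board_string ++ "  "
          else if r = -1 ∧ ¬ c = -1 then
            board_string ++ (if c + 1 < 10 then PySem.Int.toStr (c + 1) ++ " " else PySem.Int.toStr (c + 1))
          else if ¬ r = -1 ∧ c = -1 then
            board_string ++ (if r + 1 < 10 then " " ++ PySem.Int.toStr (r + 1) else PySem.Int.toStr (r + 1))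
          else board_string ++ PySem.List.pyGetD row c "")
        board_string) ++ "\n")
    ""

-- ===== PORT B =====
-- B-side helpers: the two label formatters from Source B's comprehensions.
def pvColTag (c : Int) : String :=
  if c < 9 then PySem.Int.toStr (c + 1) ++ " " else PySem.Int.toStr (c + 1)
def pvRowTag (r : Int) : String :=
  if r < 9 then " " ++ PySem.Int.toStr (r + 1) else PySem.Int.toStr (r + 1)

def board_draw_alt (board_lol : List (List String)) (show_axes : Bool) : String :=
  let grid : List (List String) :=
    if show_axes then
      ("  " :: (PySem.List.pyRange 0 ((PySem.List.pyGetD board_lol (-1) []).length : Int) 1).map pvColTag)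
        :: (PySem.List.enumerate board_lol 0).map (fun p => pvRowTag p.1 :: p.2)
    else board_lol.map (fun row => row)
  String.join (grid.map (fun cells => String.join cells ++ "\n"))

-- ===== PRECONDITION & SPEC =====
-- Pre_ excludes only (board_lol = [], show_axes = True), where both A and B raise
-- IndexError on board_lol[-1].
def Pre_board_draw (board_lol : List (List String)) (show_axes : Bool) : Prop :=
  show_axes = true → board_lol ≠ []
instance (board_lol : List (List String)) (show_axes : Bool) : Decidable (Pre_board_draw board_lol show_axes) := by unfold Pre_board_draw; infer_instance

def pvWitness_board_draw : List (List String) × Bool := ([["a", "b"], ["c"]], true)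

def Spec_board_draw (board_lol : List (List String)) (show_axes : Bool) (out : String) : Prop := out = board_draw_alt board_lol show_axes
instance (board_lol : List (List String)) (show_axes : Bool) (out : String) : Decidable (Spec_board_draw board_lol show_axes out) := by unfold Spec_board_draw; infer_instance

-- ===== CLAIM (what is proved, stated in full; the proofs are below) =====
def Claim_equal_board_draw : Prop := ∀ (board_lol : List (List String)) (show_axes : Bool), Dom_board_draw board_lol show_axes → Pre_board_draw board_lol show_axes → Spec_board_draw board_lol show_axes (board_draw board_lol show_axes)

-- ===== LEMMAS AND PROOFS =====

-- A string foldl with append is the accumulator ++ the join of the tail.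
theorem str_foldl_id (l : List String) (acc : String) :
    l.foldl (· ++ ·) acc = acc ++ String.join l := by
  induction l generalizing acc with
  | nil => simp [String.join]
  | cons a t ih =>
    have h : String.join (a :: t) = a ++ String.join t := by
      show t.foldl (· ++ ·) ("" ++ a) = _
      rw [ih]; simp
    simp only [List.foldl_cons, ih, h, String.append_assoc]

theorem str_foldl_append {α : Type} (f : α → String) (l : List α) (acc : String) :
    l.foldl (fun b x => b ++ f x) acc = acc ++ String.join (l.map f) := by
  rw [← List.foldl_map, str_foldl_id]

theorem str_join_cons (a : String) (l : List String) :
    String.join (a :: l) = a ++ String.join l := by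
  show l.foldl (· ++ ·) ("" ++ a) = _
  rw [str_foldl_id]; simp

-- A's per-row inner loop over column indices ≥ 0 appends the row's concatenation.
theorem cells_fold (row : List String) (r : Int) (hr : 0 ≤ r) (acc : String) :
    (PySem.List.pyRange 0 (row.length : Int) 1).foldl
      (fun board_string c =>
        if r = -1 ∧ c = -1 then board_string ++ "  "
        else if r = -1 ∧ ¬ c = -1 then
          board_string ++ (if c + 1 < 10 then PySem.Int.toStr (c + 1) ++ " " else PySem.Int.toStr (c + 1))
        else if ¬ r = -1 ∧ c = -1 then
          board_string ++ (if r + 1 < 10 then " " ++ PySem.Int.toStr (r + 1) else PySem.Int.toStr (r + 1))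
        else board_string ++ PySem.List.pyGetD row c "")
      acc
    = acc ++ String.join row := by
  have h1 : (PySem.List.pyRange 0 (row.length : Int) 1).foldl
      (fun board_string c =>
        if r = -1 ∧ c = -1 then board_string ++ "  "
        else if r = -1 ∧ ¬ c = -1 then
          board_string ++ (if c + 1 < 10 then PySem.Int.toStr (c + 1) ++ " " else PySem.Int.toStr (c + 1))
        else if ¬ r = -1 ∧ c = -1 then
          board_string ++ (if r + 1 < 10 then " " ++ PySem.Int.toStr (r + 1) else PySem.Int.toStr (r + 1))
        else board_string ++ PySem.List.pyGetD row c "")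
      acc
      = (PySem.List.pyRange 0 (row.length : Int) 1).foldl
          (fun board_string c => board_string ++ PySem.List.pyGetD row c "") acc := by
    apply PySem.List.foldl_congr_mem
    intro b c hc
    have h0 : 0 ≤ c := (PySem.List.mem_pyRange_one.mp hc).1
    have hrn : ¬ r = -1 := by omega
    have hcn : ¬ c = -1 := by omega
    simp [hrn, hcn]
  rw [h1, PySem.List.foldl_pyRange_zero_pyGetD' row "" (fun b cell => b ++ cell) acc,
      str_foldl_id]

-- Label formatters: A's inline conditionals equal B's helpers.
theorem colTag_eq (c : Int) :
    (if c + 1 < 10 then PySem.Int.toStr (c + 1) ++ " " else PySem.Int.toStr (c + 1)) = pvColTag c := by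
  unfold pvColTag
  by_cases h : c < 9
  · simp [h, show c + 1 < 10 by omega]
  · simp [h, show ¬ c + 1 < 10 by omega]

theorem rowTag_eq (r : Int) :
    (if r + 1 < 10 then " " ++ PySem.Int.toStr (r + 1) else PySem.Int.toStr (r + 1)) = pvRowTag r := by
  unfold pvRowTag
  by_cases h : r < 9
  · simp [h, show r + 1 < 10 by omega]
  · simp [h, show ¬ r + 1 < 10 by omega]

-- A's sentinel pass at r = -1 produces the header line's content.
theorem header_eq (row : List String) :
    (PySem.List.pyRange (-1) (row.length : Int) 1).foldl
      (fun board_string c =>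
        if True ∧ c = -1 then board_string ++ "  "
        else if True ∧ ¬ c = -1 then
          board_string ++ (if c + 1 < 10 then PySem.Int.toStr (c + 1) ++ " " else PySem.Int.toStr (c + 1))
        else if ¬ True ∧ c = -1 then
          board_string ++ (if (-1 : Int) + 1 < 10 then " " ++ PySem.Int.toStr ((-1) + 1) else PySem.Int.toStr ((-1) + 1))
        else board_string ++ PySem.List.pyGetD row c "")
      ""
    = "  " ++ String.join ((PySem.List.pyRange 0 (row.length : Int) 1).map pvColTag) := by
  have hlt : (-1 : Int) < (row.length : Int) := by
    have : (0 : Int) ≤ (row.length : Int) := Int.natCast_nonneg _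
    omega
  rw [PySem.List.pyRange_one_cons hlt]
  simp only [List.foldl_cons]
  norm_num
  have h1 : (PySem.List.pyRange 0 (row.length : Int) 1).foldl
      (fun board_string c =>
        if c = -1 then board_string ++ "  "
        else if c = -1 then board_string ++ PySem.List.pyGetD row c ""
        else board_string ++ (if c + 1 < 10 then PySem.Int.toStr (c + 1) ++ " " else PySem.Int.toStr (c + 1)))
      "  "
      = (PySem.List.pyRange 0 (row.length : Int) 1).foldl
          (fun b c => b ++ pvColTag c) "  " := by
    apply PySem.List.foldl_congr_mem
    intro b c hc
    have h0 : 0 ≤ c := (PySem.List.mem_pyRange_one.mp hc).1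
    have hcn : ¬ c = -1 := by omega
    simp only [hcn, if_false, colTag_eq]
  rw [h1, str_foldl_append pvColTag _ "  "]

-- A's per-row pass with the c = -1 sentinel appends the label and the row's cells.
theorem rowline_eq (row : List String) (r : Int) (h0 : 0 ≤ r) (acc : String) :
    (PySem.List.pyRange (-1) (row.length : Int) 1).foldl
      (fun board_string c =>
        if r = -1 ∧ c = -1 then board_string ++ "  "
        else if r = -1 ∧ ¬ c = -1 then
          board_string ++ (if c + 1 < 10 then PySem.Int.toStr (c + 1) ++ " " else PySem.Int.toStr (c + 1))
        else if ¬ r = -1 ∧ c = -1 then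
          board_string ++ (if r + 1 < 10 then " " ++ PySem.Int.toStr (r + 1) else PySem.Int.toStr (r + 1))
        else board_string ++ PySem.List.pyGetD row c "")
      acc
    = acc ++ (pvRowTag r ++ String.join row) := by
  have hrn : ¬ r = -1 := by omega
  have hlt : (-1 : Int) < (row.length : Int) := by
    have : (0 : Int) ≤ (row.length : Int) := Int.natCast_nonneg _
    omega
  rw [PySem.List.pyRange_one_cons hlt]
  simp only [List.foldl_cons]
  norm_num [hrn, rowTag_eq]
  have h1 : (PySem.List.pyRange 0 (row.length : Int) 1).foldl
      (fun board_string c =>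
        if c = -1 then board_string ++ pvRowTag r else board_string ++ PySem.List.pyGetD row c "")
      (acc ++ pvRowTag r)
      = (PySem.List.pyRange 0 (row.length : Int) 1).foldl
          (fun board_string c => board_string ++ PySem.List.pyGetD row c "") (acc ++ pvRowTag r) := by
    apply PySem.List.foldl_congr_mem
    intro b c hc
    have hc0 : 0 ≤ c := (PySem.List.mem_pyRange_one.mp hc).1
    have hcn : ¬ c = -1 := by omega
    simp [hcn]
  rw [h1, PySem.List.foldl_pyRange_zero_pyGetD' row "" (fun b cell => b ++ cell) (acc ++ pvRowTag r),
      str_foldl_id, String.append_assoc]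

-- ===== VERDICT (by name: the statement is the Claim_ definition above) =====
theorem board_draw_spec : Claim_equal_board_draw := by
  intro board_lol show_axes _ hpre
  unfold Spec_board_draw board_draw board_draw_alt
  cases show_axes with
  | false =>
    simp only [Bool.false_eq_true, if_false]
    have h1 : (PySem.List.pyRange 0 (board_lol.length : Int) 1).foldl
        (fun board_string r =>
          ((PySem.List.pyRange 0 ((PySem.List.pyGetD board_lol r []).length : Int) 1).foldl
            (fun board_string c =>
              if r = -1 ∧ c = -1 then board_string ++ "  "
              else if r = -1 ∧ ¬ c = -1 then
                board_string ++ (if c + 1 < 10 then PySem.Int.toStr (c + 1) ++ " " else PySem.Int.toStr (c + 1))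
              else if ¬ r = -1 ∧ c = -1 then
                board_string ++ (if r + 1 < 10 then " " ++ PySem.Int.toStr (r + 1) else PySem.Int.toStr (r + 1))
              else board_string ++ PySem.List.pyGetD (PySem.List.pyGetD board_lol r []) c "")
            board_string) ++ "\n")
        ""
        = (PySem.List.pyRange 0 (board_lol.length : Int) 1).foldl
            (fun b r => b ++ (String.join (PySem.List.pyGetD board_lol r []) ++ "\n")) "" := by
      apply PySem.List.foldl_congr_mem
      intro b r hr
      have h0 : 0 ≤ r := (PySem.List.mem_pyRange_one.mp hr).1
      rw [cells_fold _ r h0, String.append_assoc]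
    rw [h1, PySem.List.foldl_pyRange_zero_pyGetD' board_lol []
          (fun b row => b ++ (String.join row ++ "\n")) "",
        str_foldl_append (fun row => String.join row ++ "\n") board_lol ""]
    simp
  | true =>
    have hne : board_lol ≠ [] := hpre rfl
    have hlen : (1 : Int) ≤ (board_lol.length : Int) := by
      have := List.length_pos_iff.mpr hne
      omega
    simp only [if_true]
    rw [PySem.List.pyRange_one_cons (by omega : (-1 : Int) < (board_lol.length : Int))]
    simp only [List.foldl_cons]
    rw [header_eq, show ((-1 : Int) + 1) = 0 from by decide]
    have h2 : ∀ (acc : String), (PySem.List.pyRange 0 (board_lol.length : Int) 1).foldl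
        (fun board_string r =>
          ((PySem.List.pyRange (-1) ((PySem.List.pyGetD board_lol r []).length : Int) 1).foldl
            (fun board_string c =>
              if r = -1 ∧ c = -1 then board_string ++ "  "
              else if r = -1 ∧ ¬ c = -1 then
                board_string ++ (if c + 1 < 10 then PySem.Int.toStr (c + 1) ++ " " else PySem.Int.toStr (c + 1))
              else if ¬ r = -1 ∧ c = -1 then
                board_string ++ (if r + 1 < 10 then " " ++ PySem.Int.toStr (r + 1) else PySem.Int.toStr (r + 1))
              else board_string ++ PySem.List.pyGetD (PySem.List.pyGetD board_lol r []) c "")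
            board_string) ++ "\n")
        acc
        = acc ++ String.join ((PySem.List.pyRange 0 (board_lol.length : Int) 1).map
            (fun r => (pvRowTag r ++ String.join (PySem.List.pyGetD board_lol r [])) ++ "\n")) := by
      intro acc
      have h3 : (PySem.List.pyRange 0 (board_lol.length : Int) 1).foldl
          (fun board_string r =>
            ((PySem.List.pyRange (-1) ((PySem.List.pyGetD board_lol r []).length : Int) 1).foldl
              (fun board_string c =>
                if r = -1 ∧ c = -1 then board_string ++ "  "
                else if r = -1 ∧ ¬ c = -1 then
                  board_string ++ (if c + 1 < 10 then PySem.Int.toStr (c + 1) ++ " " else PySem.Int.toStr (c + 1))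
                else if ¬ r = -1 ∧ c = -1 then
                  board_string ++ (if r + 1 < 10 then " " ++ PySem.Int.toStr (r + 1) else PySem.Int.toStr (r + 1))
                else board_string ++ PySem.List.pyGetD (PySem.List.pyGetD board_lol r []) c "")
              board_string) ++ "\n")
          acc
          = (PySem.List.pyRange 0 (board_lol.length : Int) 1).foldl
              (fun b r => b ++ ((pvRowTag r ++ String.join (PySem.List.pyGetD board_lol r [])) ++ "\n")) acc := by
        apply PySem.List.foldl_congr_mem
        intro b r hr
        have h0 : 0 ≤ r := (PySem.List.mem_pyRange_one.mp hr).1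
        rw [rowline_eq _ r h0, String.append_assoc]
      rw [h3, str_foldl_append]
    rw [h2]
    -- B side
    rw [PySem.List.enumerate_eq_map_pyRange (d := ([] : List String))]
    simp only [List.map_cons, List.map_map, str_join_cons]
    simp only [Function.comp_def, str_join_cons]
    simp [String.append_assoc]
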